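-- pv_equiv track=rewrite | github.com/jqpython/python-learning-journey | 08-tic-tac-toe/tic_tac_toe.py | are_all_cells_the_same
-- ===== SOURCE A (Python) =====
-- def get_cells(board, coords):
--     return [board[coord[0]][coord[1]] for coord in coords]
--
-- def are_all_cells_the_same(board, coords):
--     cells = get_cells(board, coords)
--     if len(cells) == 0:
--         return False
--     first = cells[0]
--     if first == ".":
--         return False
--     return all(cell == first for cell in cells)
-- ===== SOURCE B (Python) =====
-- def are_all_cells_the_same(board, coords):
--     vals = {board[r][c] for r, c in coords}
--     return len(vals) == 1 and "." not in vals
-- ===== Notes on version B (the rewrite author's own statement) =====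
-- stated objective: idiomatic
-- what changed: Replaces the pick-first-then-compare-every-cell scan with a one-line set comprehension: the distinct cell values are collected and the answer is len(vals) == 1 and '.' not in vals.
import Mathlib
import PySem

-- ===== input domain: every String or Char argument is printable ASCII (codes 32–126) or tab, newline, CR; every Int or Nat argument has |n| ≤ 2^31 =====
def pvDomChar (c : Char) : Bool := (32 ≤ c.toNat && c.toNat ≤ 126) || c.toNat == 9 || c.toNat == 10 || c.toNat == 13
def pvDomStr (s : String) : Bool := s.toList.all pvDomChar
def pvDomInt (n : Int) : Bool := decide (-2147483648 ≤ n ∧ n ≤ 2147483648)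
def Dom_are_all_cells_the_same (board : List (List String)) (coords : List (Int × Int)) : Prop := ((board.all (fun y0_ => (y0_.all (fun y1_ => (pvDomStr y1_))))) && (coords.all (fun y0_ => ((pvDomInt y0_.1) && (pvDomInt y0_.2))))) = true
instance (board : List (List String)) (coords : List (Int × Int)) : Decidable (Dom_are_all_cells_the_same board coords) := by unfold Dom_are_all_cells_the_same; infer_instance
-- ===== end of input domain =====

-- B replaces A's pick-first-then-compare-every-cell scan with a set of the distinct
-- selected values: true iff there is exactly one distinct value and it is not ".".

-- ===== PORT A =====
-- board[coord[0]][coord[1]] : none = IndexError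
def pvCell (board : List (List String)) (c : Int × Int) : Option String :=
  (PySem.List.pyGet? board c.1).bind (fun row => PySem.List.pyGet? row c.2)

-- get_cells(board, coords) : none = some lookup raised IndexError
def get_cells (board : List (List String)) (coords : List (Int × Int)) : Option (List String) :=
  coords.mapM (pvCell board)

def are_all_cells_the_same (board : List (List String)) (coords : List (Int × Int)) : Bool :=
  match get_cells board coords with
  | none => false   -- Python raises here; excluded by Pre_
  | some cells =>
    if cells.length = 0 then false
    else
      let first := cells.headD ""
      if first = "." then false
      else cells.all (fun cell => cell == first)

-- ===== PORT B =====
-- the set comprehension {board[r][c] for (r, c) in coords}: none = IndexError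
def pvValsB (board : List (List String)) : List (Int × Int) → PySem.Set String → Option (PySem.Set String)
  | [], s => some s
  | c :: rest, s =>
    match pvCell board c with
    | none => none
    | some v => pvValsB board rest (PySem.Set.add s v)

def are_all_cells_the_same_alt (board : List (List String)) (coords : List (Int × Int)) : Bool :=
  match pvValsB board coords PySem.Set.empty with
  | none => false   -- Python raises here; excluded by Pre_
  | some vals => PySem.Set.len vals == 1 && !(PySem.Set.contains vals ".")

-- ===== PRECONDITION & SPEC =====
-- every coordinate is a valid (Python, possibly negative) index into the board: otherwise A raises IndexError
def pvCoordOk (board : List (List String)) (c : Int × Int) : Bool :=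
  match PySem.List.pyGet? board c.1 with
  | none => false
  | some row => decide (PySem.Raise.InRange row.length c.2)

def Pre_are_all_cells_the_same (board : List (List String)) (coords : List (Int × Int)) : Prop :=
  ∀ c ∈ coords, pvCoordOk board c = true
instance (board : List (List String)) (coords : List (Int × Int)) : Decidable (Pre_are_all_cells_the_same board coords) := by unfold Pre_are_all_cells_the_same; infer_instance

def pvWitness_are_all_cells_the_same : List (List String) × (List (Int × Int)) :=
  ([["X", "X"], ["O", "X"]], [(0, 0), (0, 1), (1, 1)])

def Spec_are_all_cells_the_same (board : List (List String)) (coords : List (Int × Int)) (out : Bool) : Prop := out = are_all_cells_the_same_alt board coords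
instance (board : List (List String)) (coords : List (Int × Int)) (out : Bool) : Decidable (Spec_are_all_cells_the_same board coords out) := by unfold Spec_are_all_cells_the_same; infer_instance

-- ===== CLAIM (what is proved, stated in full; the proofs are below) =====
def Claim_equal_are_all_cells_the_same : Prop := ∀ (board : List (List String)) (coords : List (Int × Int)), Dom_are_all_cells_the_same board coords → Pre_are_all_cells_the_same board coords → Spec_are_all_cells_the_same board coords (are_all_cells_the_same board coords)

-- ===== LEMMAS AND PROOFS =====

-- B's accumulating loop is (result of A's get_cells) folded into the accumulator set
theorem pvValsB_eq_mapM (board : List (List String)) (coords : List (Int × Int)) (s : PySem.Set String) :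
    pvValsB board coords s = (get_cells board coords).map (fun cs => cs.foldl PySem.Set.add s) := by
  induction coords generalizing s with
  | nil => rfl
  | cons c rest ih =>
    simp only [pvValsB, get_cells, List.mapM_cons]
    cases h : pvCell board c with
    | none => rfl
    | some v =>
      simp only [ih, get_cells]
      cases (rest.mapM (pvCell board)) <;> rfl

theorem length_foldl_add_ge (rest : List String) (s : PySem.Set String) :
    s.length ≤ (rest.foldl PySem.Set.add s).length := by
  induction rest generalizing s with
  | nil => exact Nat.le_refl _
  | cons x xs ih =>
    refine Nat.le_trans ?_ (ih (PySem.Set.add s x))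
    simp only [PySem.Set.add]
    split
    · exact Nat.le_refl _
    · simp

theorem length_foldl_add_eq_iff (rest : List String) (s : PySem.Set String) :
    (rest.foldl PySem.Set.add s).length = s.length ↔ ∀ x ∈ rest, s.contains x := by
  induction rest generalizing s with
  | nil => simp
  | cons x xs ih =>
    simp only [List.foldl_cons, List.mem_cons]
    by_cases hx : x ∈ s
    · have : PySem.Set.add s x = s := by simp [PySem.Set.add, hx]
      rw [this, ih]
      constructor
      · intro h y hy
        rcases hy with rfl | hy
        · simpa using hx
        · exact h y hy
      · intro h y hy; exact h y (Or.inr hy)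
    · have hadd : PySem.Set.add s x = s ++ [x] := by simp [PySem.Set.add, hx]
      constructor
      · intro h
        exfalso
        have hge := length_foldl_add_ge xs (PySem.Set.add s x)
        rw [hadd] at hge h
        simp at hge
        omega
      · intro h
        have := h x (Or.inl rfl)
        simp at this
        exact absurd this hx

theorem foldl_add_const (first : String) :
    ∀ (rest : List String), (∀ x ∈ rest, x = first) → rest.foldl PySem.Set.add [first] = [first]
  | [], _ => rfl
  | y :: ys, h => by
    have hy : y = first := h y (by simp)
    have hadd : PySem.Set.add [first] y = [first] := by
      simp [PySem.Set.add, hy]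
    simp only [List.foldl_cons, hadd]
    exact foldl_add_const first ys (fun x hx => h x (by simp [hx]))

-- the core equivalence on a nonempty cell list
theorem scan_eq_set (first : String) (rest : List String) :
    (if first = "." then false else (first :: rest).all (fun cell => cell == first))
      = (PySem.Set.len (PySem.Set.ofList (first :: rest)) == 1
          && !(PySem.Set.contains (PySem.Set.ofList (first :: rest)) ".")) := by
  have hof : PySem.Set.ofList (first :: rest) = rest.foldl PySem.Set.add [first] := by
    simp [PySem.Set.ofList_eq_foldl, PySem.Set.add, PySem.Set.contains]
  by_cases hall : ∀ x ∈ rest, x = first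
  · rw [hof, foldl_add_const first rest hall]
    have hallb : (first :: rest).all (fun cell => cell == first) = true := by
      rw [List.all_eq_true]
      intro c hc
      rcases List.mem_cons.mp hc with rfl | h
      · simp
      · simp [hall c h]
    by_cases hdot : first = "."
    · simp [hdot, PySem.Set.len, PySem.Set.contains]
    · simp [hdot, hallb, PySem.Set.len, PySem.Set.contains]
      exact fun h => hdot h.symm
  · -- not all equal: both sides false
    have hne : ¬ ∀ x ∈ rest, ([first] : PySem.Set String).contains x := by
      intro h
      apply hall
      intro x hx
      have := h x hx
      simpa [PySem.Set.contains, eq_comm] using this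
    have hlen : (rest.foldl PySem.Set.add [first]).length ≠ 1 := by
      intro h1
      exact hne ((length_foldl_add_eq_iff rest [first]).mp (by simpa using h1))
    have hrhs : (PySem.Set.len (PySem.Set.ofList (first :: rest)) == 1) = false := by
      rw [hof]
      simpa [PySem.Set.len] using hlen
    rw [hrhs]
    simp only [Bool.false_and]
    obtain ⟨x, hx, hxne⟩ := by push Not at hall; exact hall
    have hallb : (first :: rest).all (fun cell => cell == first) = false := by
      rw [List.all_eq_false]
      exact ⟨x, by simp [hx], by simp [hxne]⟩
    by_cases hdot : first = "."
    · simp [hdot]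
    · simp [hdot, hallb]

-- ===== VERDICT (by name: the statement is the Claim_ definition above) =====
theorem are_all_cells_the_same_spec : Claim_equal_are_all_cells_the_same := by
  intro board coords _ _
  unfold Spec_are_all_cells_the_same are_all_cells_the_same are_all_cells_the_same_alt
  rw [pvValsB_eq_mapM]
  cases h : get_cells board coords with
  | none => rfl
  | some cells =>
    simp only [Option.map_some]
    cases cells with
    | nil => simp [PySem.Set.len, PySem.Set.empty]
    | cons first rest =>
      simp only [List.length_cons, List.headD_cons]
      have := scan_eq_set first rest
      rw [PySem.Set.ofList_eq_foldl] at this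
      simpa [PySem.Set.empty] using this
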